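-- pv_equiv track=rewrite | github.com/leonardmusat/Python_lab | tema_2/ex4.py | muzic
-- ===== SOURCE A (Python) =====
-- def muzic(string, list, integer):
--     notes = string.split()
--     rez = []
--     rez.append(notes[integer])
--     for i in list:
--         rez.append(notes[(integer + i)%5])
--         integer = integer + i
--     return rez
-- ===== SOURCE B (Python) =====
-- def muzic(string, list, integer):
--     notes = string.split()
--     cum = [integer]
--     for x in list:
--         cum.append(cum[-1] + x)
--     return [notes[cum[0]]] + [notes[c % 5] for c in cum[1:]]
-- ===== Notes on version B (the rewrite author's own statement) =====
-- stated objective: alternative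
-- what changed: B first materialises the running-sum sequence (a prefix-sum pass), then produces the result as one unmodded head lookup plus a map of mod-5 lookups, instead of A's single loop that interleaves accumulation with appending.
import Mathlib
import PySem

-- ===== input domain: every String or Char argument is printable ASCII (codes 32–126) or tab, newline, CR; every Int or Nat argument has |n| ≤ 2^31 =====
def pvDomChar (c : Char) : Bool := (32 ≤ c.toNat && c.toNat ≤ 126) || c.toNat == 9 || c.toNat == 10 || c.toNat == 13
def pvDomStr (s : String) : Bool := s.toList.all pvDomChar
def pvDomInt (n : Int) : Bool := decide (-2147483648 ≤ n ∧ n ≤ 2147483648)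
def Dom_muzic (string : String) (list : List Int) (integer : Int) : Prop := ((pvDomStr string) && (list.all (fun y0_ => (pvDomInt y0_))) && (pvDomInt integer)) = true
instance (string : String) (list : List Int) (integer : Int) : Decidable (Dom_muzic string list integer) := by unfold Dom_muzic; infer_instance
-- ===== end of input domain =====

-- B separates the prefix-sum pass from the note-lookup pass (head unmodded, rest mod 5),
-- where A interleaves both in one accumulating loop; same cost, different decomposition.

-- ===== PORT A =====
def muzic (string : String) (list : List Int) (integer : Int) : List String :=
  let notes := PySem.Str.split₀ string
  -- rez = [notes[integer]]; for i in list: rez.append(notes[(integer+i)%5]); integer += i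
  (list.foldl
    (fun (st : List String × Int) i =>
      (st.1 ++ [PySem.List.pyGetD notes (PySem.Int.mod (st.2 + i) 5) ""], st.2 + i))
    ([PySem.List.pyGetD notes integer ""], integer)).1

-- ===== PORT B =====
def muzic_alt (string : String) (list : List Int) (integer : Int) : List String :=
  let notes := PySem.Str.split₀ string
  -- cum = [integer]; for x in list: cum.append(cum[-1] + x)
  let cum := list.foldl (fun (acc : List Int) x => acc ++ [PySem.List.pyGetD acc (-1) 0 + x]) [integer]
  -- [notes[cum[0]]] + [notes[c % 5] for c in cum[1:]]
  match cum with
  | [] => []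
  | c0 :: rest =>
      [PySem.List.pyGetD notes c0 ""] ++
        rest.map (fun c => PySem.List.pyGetD notes (PySem.Int.mod c 5) "")

-- ===== PRECONDITION & SPEC =====
-- Pre_ excludes exactly the IndexError inputs of the Python: the first lookup notes[integer]
-- must be in range, and every running sum taken mod 5 must index into notes.
def Pre_muzic (string : String) (list : List Int) (integer : Int) : Prop :=
  PySem.Raise.InRange (PySem.Str.split₀ string).length integer ∧
  ∀ c ∈ (list.scanl (· + ·) integer).tail,
    PySem.Int.mod c 5 < ((PySem.Str.split₀ string).length : Int)
instance (string : String) (list : List Int) (integer : Int) : Decidable (Pre_muzic string list integer) := by unfold Pre_muzic; infer_instance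

def pvWitness_muzic : String × List Int × Int := ("x", [5, 5, 5], 0)

def Spec_muzic (string : String) (list : List Int) (integer : Int) (out : List String) : Prop := out = muzic_alt string list integer
instance (string : String) (list : List Int) (integer : Int) (out : List String) : Decidable (Spec_muzic string list integer out) := by unfold Spec_muzic; infer_instance

-- ===== CLAIM (what is proved, stated in full; the proofs are below) =====
def Claim_equal_muzic : Prop := ∀ (string : String) (list : List Int) (integer : Int), Dom_muzic string list integer → Pre_muzic string list integer → Spec_muzic string list integer (muzic string list integer)

-- ===== LEMMAS AND PROOFS =====

-- running sums after each addition, starting from n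
def pvTails (n : Int) : List Int → List Int
  | [] => []
  | x :: xs => (n + x) :: pvTails (n + x) xs

theorem muzic_foldlA (notes : List String) (l : List Int) (rez : List String) (n : Int) :
    (l.foldl
      (fun (st : List String × Int) i =>
        (st.1 ++ [PySem.List.pyGetD notes (PySem.Int.mod (st.2 + i) 5) ""], st.2 + i))
      (rez, n)).1
    = rez ++ (pvTails n l).map (fun c => PySem.List.pyGetD notes (PySem.Int.mod c 5) "") := by
  induction l generalizing rez n with
  | nil => simp [pvTails]
  | cons x xs ih =>
    simp only [List.foldl_cons, pvTails, List.map_cons]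
    rw [ih]
    simp

theorem muzic_foldlB (l : List Int) (cs : List Int) (c : Int) :
    l.foldl (fun (acc : List Int) x => acc ++ [PySem.List.pyGetD acc (-1) 0 + x]) (cs ++ [c])
    = (cs ++ [c]) ++ pvTails c l := by
  induction l generalizing cs c with
  | nil => simp [pvTails]
  | cons x xs ih =>
    simp only [List.foldl_cons, PySem.List.pyGetD_neg_one_append_singleton, pvTails]
    rw [ih (cs ++ [c]) (c + x)]
    simp

-- ===== VERDICT (by name: the statement is the Claim_ definition above) =====
theorem muzic_spec : Claim_equal_muzic := by
  intro string list integer _ _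
  unfold Spec_muzic muzic muzic_alt
  rw [muzic_foldlA]
  have hB := muzic_foldlB list [] integer
  simp only [List.nil_append] at hB
  rw [hB]
  simp
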